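-- pv_equiv track=rewrite | github.com/peytontolbert/agent_kernel | agent_kernel/modeling/tolbert/runtime.py | _trusted_retrieval_procedure_prefix_match
-- ===== SOURCE A (Python) =====
-- def _trusted_retrieval_procedure_prefix_match(
--     recent_commands: list[str],
--     procedure_commands: list[str],
-- ) -> int:
--     if len(procedure_commands) < 2:
--         return 0
--     max_prefix = min(len(recent_commands), len(procedure_commands) - 1)
--     for prefix_len in range(max_prefix, 0, -1):
--         if recent_commands[-prefix_len:] == procedure_commands[:prefix_len]:
--             return prefix_len
--     return 0
-- ===== SOURCE B (Python) =====
-- def _trusted_retrieval_procedure_prefix_match(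
--     recent_commands: list[str],
--     procedure_commands: list[str],
-- ) -> int:
--     if len(procedure_commands) < 2:
--         return 0
--     m = min(len(recent_commands), len(procedure_commands) - 1)
--     if m == 0:
--         return 0
--     p = procedure_commands[:m]
--     # KMP prefix function of p
--     pi = [0]
--     k = 0
--     for i in range(1, m):
--         while k > 0 and p[i] != p[k]:
--             k = pi[k - 1]
--         if p[i] == p[k]:
--             k += 1
--         pi.append(k)
--     # run the KMP automaton over the last m recent commands
--     s = 0
--     for c in recent_commands[-m:]:
--         while s > 0 and c != p[s]:
--             s = pi[s - 1]
--         if c == p[s]: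
--             s += 1
--     return s
-- ===== Notes on version B (the rewrite author's own statement) =====
-- stated objective: faster
-- what changed: Replaced A's descending brute-force test of every candidate overlap length (each a full slice comparison) by a KMP prefix-function automaton run once over the last max_prefix recent commands.
import Mathlib
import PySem

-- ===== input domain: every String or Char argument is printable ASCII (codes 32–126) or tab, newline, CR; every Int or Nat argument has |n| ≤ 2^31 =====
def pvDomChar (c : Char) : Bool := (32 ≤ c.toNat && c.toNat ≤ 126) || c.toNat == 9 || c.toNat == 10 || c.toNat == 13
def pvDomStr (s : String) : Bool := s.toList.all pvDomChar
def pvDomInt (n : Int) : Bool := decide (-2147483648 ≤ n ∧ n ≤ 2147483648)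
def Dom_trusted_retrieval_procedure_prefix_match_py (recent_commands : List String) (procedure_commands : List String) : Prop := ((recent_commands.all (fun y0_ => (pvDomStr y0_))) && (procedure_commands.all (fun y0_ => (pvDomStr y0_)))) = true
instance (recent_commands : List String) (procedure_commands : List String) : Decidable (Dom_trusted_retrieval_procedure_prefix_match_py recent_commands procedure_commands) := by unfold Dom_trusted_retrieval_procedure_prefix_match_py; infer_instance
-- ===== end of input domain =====

-- B replaces A's quadratic descending scan over all candidate overlap lengths by a linear
-- KMP prefix-function automaton run over the last max_prefix recent commands (objective: faster).

-- ===== PORT A =====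
-- 'for prefix_len in range(max_prefix, 0, -1): if recent[-prefix_len:] == procedure[:prefix_len]: return prefix_len'
def pvALoop (recent_commands procedure_commands : List String) : List Int → Int
  | [] => 0
  | k :: rest =>
    if PySem.List.slice recent_commands (some (-k)) none
         = PySem.List.slice procedure_commands none (some k)
    then k
    else pvALoop recent_commands procedure_commands rest

def trusted_retrieval_procedure_prefix_match_py (recent_commands : List String) (procedure_commands : List String) : Int :=
  if (procedure_commands.length : Int) < 2 then 0
  else
    let max_prefix : Int := min (recent_commands.length : Int) ((procedure_commands.length : Int) - 1)
    pvALoop recent_commands procedure_commands (PySem.List.pyRange max_prefix 0 (-1))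

-- ===== PORT B =====
-- 'while k > 0 and c != p[k]: k = pi[k-1]'  (fuel = initial k bounds the iterations: each step strictly decreases k)
def pvFall (p : List String) (pi : List Nat) (c : String) : Nat → Nat → Nat
  | 0, k => k
  | fuel + 1, k =>
    if k ≠ 0 ∧ c ≠ p.getD k "" then pvFall p pi c fuel (pi.getD (k - 1) 0) else k

-- the shared body of both of Source B's loops: fall back along borders, then extend by one on a match
def pvStep (p : List String) (pi : List Nat) (s : Nat) (c : String) : Nat :=
  let k := pvFall p pi c s s
  if c = p.getD k "" then k + 1 else k

-- 'pi = [0]; k = 0; for i in range(1, m): ...; pi.append(k)'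
def pvPiStep (p : List String) (st : List Nat × Nat) (i : Nat) : List Nat × Nat :=
  let k' := pvStep p st.1 st.2 (p.getD i "")
  (st.1 ++ [k'], k')

def pvPi (p : List String) : List Nat :=
  ((List.range' 1 (p.length - 1)).foldl (pvPiStep p) ([0], 0)).1

def trusted_retrieval_procedure_prefix_match_py_alt (recent_commands : List String) (procedure_commands : List String) : Int :=
  if (procedure_commands.length : Int) < 2 then 0
  else
    let m := min recent_commands.length (procedure_commands.length - 1)
    if m = 0 then 0
    else
      let p := procedure_commands.take m
      let pi := pvPi p
      (((PySem.List.slice recent_commands (some (-(m : Int))) none).foldl (pvStep p pi) 0 : Nat) : Int)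

-- ===== PRECONDITION & SPEC =====
def Spec_trusted_retrieval_procedure_prefix_match_py (recent_commands : List String) (procedure_commands : List String) (out : Int) : Prop := out = trusted_retrieval_procedure_prefix_match_py_alt recent_commands procedure_commands
instance (recent_commands : List String) (procedure_commands : List String) (out : Int) : Decidable (Spec_trusted_retrieval_procedure_prefix_match_py recent_commands procedure_commands out) := by unfold Spec_trusted_retrieval_procedure_prefix_match_py; infer_instance

-- ===== CLAIM (what is proved, stated in full; the proofs are below) =====
def Claim_equal_trusted_retrieval_procedure_prefix_match_py : Prop := ∀ (recent_commands : List String) (procedure_commands : List String), Dom_trusted_retrieval_procedure_prefix_match_py recent_commands procedure_commands → Spec_trusted_retrieval_procedure_prefix_match_py recent_commands procedure_commands (trusted_retrieval_procedure_prefix_match_py recent_commands procedure_commands)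

-- ===== LEMMAS AND PROOFS =====

-- the value both programs compute: the greatest k ≤ b with p.take k a suffix of t
def pvBest (p t : List String) (b : Nat) : Nat :=
  Nat.findGreatest (fun k => p.take k <:+ t) b

theorem pv_suffix_of_suffix_length_le {l₁ l₂ l₃ : List String}
    (h1 : l₁ <:+ l₃) (h2 : l₂ <:+ l₃) (h : l₁.length ≤ l₂.length) : l₁ <:+ l₂ := by
  rw [← List.reverse_prefix] at h1 h2 ⊢
  exact List.prefix_of_prefix_length_le h1 h2 (by simpa using h)

theorem pv_chain {p t : List String} {s k : Nat} (hs : p.take s <:+ t)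
    (hks : k ≤ s) (_hsp : s ≤ p.length) :
    (p.take k <:+ t ↔ p.take k <:+ p.take s) := by
  constructor
  · intro hk
    apply pv_suffix_of_suffix_length_le hk hs
    simp [List.length_take]; omega
  · intro hk; exact hk.trans hs

theorem pv_take_succ' {p : List String} {j : Nat} (h1 : 1 ≤ j) (h2 : j ≤ p.length) :
    p.take j = p.take (j - 1) ++ [p.getD (j - 1) ""] := by
  have hj : j - 1 < p.length := by omega
  have : j = (j - 1) + 1 := by omega
  rw [this, List.take_add_one, List.getElem?_eq_getElem hj]
  simp [List.getD, List.getElem?_eq_getElem hj]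

theorem pv_concat_suffix_concat {u t : List String} {x c : String} :
    u ++ [x] <:+ t ++ [c] ↔ x = c ∧ u <:+ t := by
  rw [← List.reverse_prefix, ← List.reverse_prefix (l₁ := u)]
  simp [List.reverse_append, List.cons_prefix_cons]

theorem pv_take_suffix_concat {p t : List String} {c : String} {j : Nat} (hj : j ≤ p.length) :
    (p.take j <:+ t ++ [c] ↔ (j = 0 ∨ (1 ≤ j ∧ c = p.getD (j - 1) "" ∧ p.take (j - 1) <:+ t))) := by
  rcases Nat.eq_zero_or_pos j with rfl | hpos
  · simp [List.suffix_append_of_suffix]  -- take 0 = [] is a suffix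
  · rw [pv_take_succ' hpos hj, pv_concat_suffix_concat]
    constructor
    · rintro ⟨hx, hu⟩; exact Or.inr ⟨hpos, hx.symm, hu⟩
    · rintro (h0 | ⟨_, hx, hu⟩); · omega
      exact ⟨hx.symm, hu⟩

theorem pv_findGreatest_congr {P Q : Nat → Prop} [DecidablePred P] [DecidablePred Q]
    (n : Nat) (h : ∀ k, k ≤ n → (P k ↔ Q k)) :
    Nat.findGreatest P n = Nat.findGreatest Q n := by
  induction n with
  | zero => rfl
  | succ n ih =>
    rw [Nat.findGreatest_succ, Nat.findGreatest_succ, ih (fun k hk => h k (by omega))]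
    by_cases hP : P (n+1)
    · rw [if_pos hP, if_pos ((h (n+1) le_rfl).mp hP)]
    · rw [if_neg hP, if_neg (fun hQ => hP ((h (n+1) le_rfl).mpr hQ))]

theorem pv_findGreatest_shrink {P : Nat → Prop} [DecidablePred P] {m n : Nat}
    (hmn : m ≤ n) (h : ∀ j, m < j → j ≤ n → ¬ P j) :
    Nat.findGreatest P n = Nat.findGreatest P m := by
  induction n with
  | zero => have : m = 0 := by omega
            subst this; rfl
  | succ n ih =>
    rcases Nat.eq_or_lt_of_le hmn with rfl | hlt
    · rfl
    · rw [Nat.findGreatest_succ, if_neg (h (n+1) hlt le_rfl)]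
      exact ih (by omega) (fun j h1 h2 => h j h1 (by omega))

theorem pv_best_spec {p t : List String} {b : Nat} (h : pvBest p t b ≠ 0) :
    p.take (pvBest p t b) <:+ t := by
  have := (Nat.findGreatest_eq_iff (P := fun k => p.take k <:+ t) (k := b)
    (m := pvBest p t b)).mp rfl
  exact this.2.1 h

theorem pv_best_le {p t : List String} (b : Nat) : pvBest p t b ≤ b :=
  Nat.findGreatest_le b

theorem pv_best_take_suffix {p t : List String} {b : Nat} : p.take (pvBest p t b) <:+ t := by
  rcases Nat.eq_zero_or_pos (pvBest p t b) with h0 | hpos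
  · simp [h0]
  · exact pv_best_spec (by omega)

theorem pv_le_best {p t : List String} {b j : Nat} (hj : j ≤ b) (h : p.take j <:+ t) :
    j ≤ pvBest p t b :=
  Nat.le_findGreatest hj h

theorem pv_best_le_length {p t : List String} {b : Nat} (hb : b ≤ p.length) :
    pvBest p t b ≤ t.length := by
  have h1 := pv_best_take_suffix (p := p) (t := t) (b := b)
  have h2 := h1.length_le
  have h3 := pv_best_le (p := p) (t := t) b
  simpa [List.length_take, Nat.min_def, (by omega : pvBest p t b ≤ p.length)] using h2

theorem pv_fall_correct (p : List String) (pi : List Nat) (c : String) :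
    ∀ fuel s, s ≤ fuel → s ≤ p.length →
    (∀ j, 1 ≤ j → j ≤ s → pi.getD (j - 1) 0 = pvBest p (p.take j) (j - 1)) →
    pvFall p pi c fuel s
      = Nat.findGreatest (fun j => p.take j <:+ p.take s ∧ c = p.getD j "") s := by
  intro fuel
  induction fuel with
  | zero =>
    intro s hs _ _
    interval_cases s
    rfl
  | succ fuel ih =>
    intro s hsf hsp hpi
    show (if s ≠ 0 ∧ c ≠ p.getD s "" then pvFall p pi c fuel (pi.getD (s - 1) 0) else s) = _
    by_cases hc : s ≠ 0 ∧ c ≠ p.getD s ""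
    · rw [if_pos hc]
      have hspi := hpi s (by omega) le_rfl
      set s' := pvBest p (p.take s) (s - 1) with hs'def
      have hs'le : s' ≤ s - 1 := pv_best_le _
      have hs'suf : p.take s' <:+ p.take s := pv_best_take_suffix
      rw [hspi, ih s' (by omega) (by omega)
        (fun j h1 h2 => hpi j h1 (by omega))]
      have step1 : Nat.findGreatest (fun j => p.take j <:+ p.take s ∧ c = p.getD j "") s
          = Nat.findGreatest (fun j => p.take j <:+ p.take s ∧ c = p.getD j "") s' := by
        apply pv_findGreatest_shrink (by omega)
        intro j hj1 hj2 hP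
        rcases Nat.eq_or_lt_of_le hj2 with rfl | hlt
        · exact hc.2 hP.2
        · have : j ≤ s' := pv_le_best (by omega) hP.1
          omega
      rw [step1]
      apply pv_findGreatest_congr
      intro k hk
      have := pv_chain (p := p) (t := p.take s) (s := s') (k := k) hs'suf hk (by omega)
      tauto
    · rw [if_neg hc]
      rcases Nat.eq_zero_or_pos s with rfl | hpos
      · rfl
      · have hceq : c = p.getD s "" := by
          by_cases h : c = p.getD s ""
          · exact h
          · exact absurd ⟨by omega, h⟩ hc
        have hP : p.take s <:+ p.take s ∧ c = p.getD s "" := ⟨List.suffix_refl _, hceq⟩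
        have h1 := Nat.le_findGreatest (P := fun j => p.take j <:+ p.take s ∧ c = p.getD j "") (le_refl s) hP
        have h2 := Nat.findGreatest_le (P := fun j => p.take j <:+ p.take s ∧ c = p.getD j "") s
        omega

theorem pv_step_correct {p : List String} {pi : List Nat} {c : String} {t : List String}
    {b b' s : Nat}
    (hs : s = pvBest p t b) (hslt : s < p.length)
    (hb' : s + 1 ≤ b') (hbb : b' ≤ b + 1) (hb'm : b' ≤ p.length)
    (hpi : ∀ j, 1 ≤ j → j ≤ s → pi.getD (j - 1) 0 = pvBest p (p.take j) (j - 1)) :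
    pvStep p pi s c = pvBest p (t ++ [c]) b' := by
  have ht : p.take s <:+ t := by rw [hs]; exact pv_best_take_suffix
  unfold pvStep
  rw [pv_fall_correct p pi c s s le_rfl (by omega) hpi]
  set j0 := Nat.findGreatest (fun j => p.take j <:+ p.take s ∧ c = p.getD j "") s with hj0def
  have hj0le : j0 ≤ s := Nat.findGreatest_le s
  have hj0max : ∀ j, j ≤ s → (p.take j <:+ p.take s ∧ c = p.getD j "") → j ≤ j0 :=
    fun j hj hP => Nat.le_findGreatest hj hP
  have hj0suf : p.take j0 <:+ p.take s := by
    rcases Nat.eq_zero_or_pos j0 with h0 | hpos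
    · simp [h0]
    · have := (Nat.findGreatest_eq_iff (P := fun j => p.take j <:+ p.take s ∧ c = p.getD j "")
        (k := s) (m := j0)).mp hj0def.symm
      exact (this.2.1 (by omega)).1
  -- characterisation of members of the new best set
  have hchar : ∀ R, R ≠ 0 → R ≤ b' → p.take R <:+ t ++ [c] →
      (c = p.getD (R - 1) "" ∧ p.take (R - 1) <:+ p.take s ∧ R - 1 ≤ s) := by
    intro R hR0 hRb hRs
    have := (pv_take_suffix_concat (p := p) (t := t) (c := c) (j := R) (by omega)).mp hRs
    rcases this with h0 | ⟨_, hceq, hsu⟩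
    · omega
    · have hR1s : R - 1 ≤ s := by
        rw [hs]; exact pv_le_best (by omega) hsu
      exact ⟨hceq, (pv_chain ht hR1s (by omega)).mp hsu, hR1s⟩
  by_cases hc : c = p.getD j0 ""
  · rw [if_pos hc]
    have hnew : p.take (j0 + 1) <:+ t ++ [c] := by
      rw [pv_take_suffix_concat (by omega)]
      exact Or.inr ⟨by omega, by simpa using hc, by simpa using hj0suf.trans ht⟩
    have hge : j0 + 1 ≤ pvBest p (t ++ [c]) b' := pv_le_best (by omega) hnew
    have hle : pvBest p (t ++ [c]) b' ≤ j0 + 1 := by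
      set R := pvBest p (t ++ [c]) b' with hRdef
      rcases Nat.eq_zero_or_pos R with h0 | hpos
      · omega
      · have hRs := pv_best_spec (p := p) (t := t ++ [c]) (b := b') (by omega)
        have hRb := pv_best_le (p := p) (t := t ++ [c]) b'
        obtain ⟨hceq, hsuf, hR1s⟩ := hchar R (by omega) (by omega) hRs
        have := hj0max (R - 1) hR1s ⟨hsuf, hceq⟩
        omega
    omega
  · rw [if_neg hc]
    have hj00 : j0 = 0 := by
      rcases Nat.eq_zero_or_pos j0 with h0 | hpos
      · exact h0
      · have := (Nat.findGreatest_eq_iff (P := fun j => p.take j <:+ p.take s ∧ c = p.getD j "")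
          (k := s) (m := j0)).mp hj0def.symm
        exact absurd (this.2.1 (by omega)).2 hc
    set R := pvBest p (t ++ [c]) b' with hRdef
    rcases Nat.eq_zero_or_pos R with h0 | hpos
    · omega
    · have hRs := pv_best_spec (p := p) (t := t ++ [c]) (b := b') (by omega)
      have hRb := pv_best_le (p := p) (t := t ++ [c]) b'
      obtain ⟨hceq, hsuf, hR1s⟩ := hchar R (by omega) (by omega) hRs
      have hR1j0 := hj0max (R - 1) hR1s ⟨hsuf, hceq⟩
      have hR1 : R = 1 := by omega
      rw [hR1] at hceq
      simp only [Nat.sub_self] at hceq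
      rw [hj00] at hc
      exact absurd hceq hc

theorem pv_getD_mapF (F : Nat → Nat) (len i : Nat) (h : i < len) :
    ((List.range' 1 len).map F).getD i 0 = F (1 + i) := by
  rw [List.getD_eq_getElem?_getD, List.getElem?_map]
  have : (List.range' 1 len)[i]? = some (1 + i) := by
    rw [List.getElem?_eq_getElem (by simpa using h)]
    simp [List.getElem_range']
  rw [this]
  rfl

theorem pv_pi_build (p : List String) :
    ∀ n, n + 1 ≤ p.length →
    (List.range' 1 n).foldl (pvPiStep p) ([0], 0)
      = ((List.range' 1 (n + 1)).map (fun j => pvBest p (p.take j) (j - 1)),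
         pvBest p (p.take (n + 1)) n) := by
  intro n
  induction n with
  | zero =>
    intro _
    simp [pvBest, List.range'_one]
  | succ n ih =>
    intro hlen
    rw [List.range'_concat, List.foldl_append, ih (by omega)]
    simp only [List.foldl_cons, List.foldl_nil]
    have hstep : pvStep p ((List.range' 1 (n + 1)).map (fun j => pvBest p (p.take j) (j - 1)))
        (pvBest p (p.take (n + 1)) n) (p.getD (1 + 1 * n) "")
        = pvBest p (p.take (n + 2)) (n + 1) := by
      have h1n : 1 + 1 * n = n + 1 := by omega
      rw [h1n]
      have := pv_step_correct (p := p) (pi := (List.range' 1 (n + 1)).map (fun j => pvBest p (p.take j) (j - 1)))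
        (c := p.getD (n + 1) "") (t := p.take (n + 1)) (b := n) (b' := n + 1)
        (s := pvBest p (p.take (n + 1)) n) rfl
        (by have := pv_best_le (p := p) (t := p.take (n + 1)) n; omega)
        (by have := pv_best_le (p := p) (t := p.take (n + 1)) n; omega)
        (by omega) (by omega)
        (fun j h1 h2 => by
          have hjn : j - 1 < n + 1 := by
            have hbl : pvBest p (p.take (n + 1)) n ≤ n := pv_best_le n
            omega
          rw [pv_getD_mapF _ _ _ hjn, show 1 + (j - 1) = j from by omega])
      have ht2 : p.take (n + 2) = p.take (n + 1) ++ [p.getD (n + 1) ""] := by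
        have h := pv_take_succ' (p := p) (j := n + 2) (by omega) (by omega)
        simpa using h
      rw [this, ← ht2]
    rw [pvPiStep]
    simp only [hstep]
    have hr : List.range' 1 (n + 1 + 1) = List.range' 1 (n + 1) ++ [n + 2] := by
      rw [List.range'_concat]
      norm_num
      omega
    rw [hr, List.map_append, List.map_cons, List.map_nil]
    norm_num

theorem pv_pi_spec (p : List String) (hp : 1 ≤ p.length) :
    ∀ j, 1 ≤ j → j ≤ p.length → (pvPi p).getD (j - 1) 0 = pvBest p (p.take j) (j - 1) := by
  intro j h1 h2
  unfold pvPi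
  rw [pv_pi_build p (p.length - 1) (by omega)]
  have : p.length - 1 + 1 = p.length := by omega
  rw [this]
  rw [pv_getD_mapF _ _ _ (by omega), show 1 + (j - 1) = j from by omega]

theorem pv_best_nil {p : List String} (hp : 1 ≤ p.length) : pvBest p [] p.length = 0 := by
  unfold pvBest
  rw [Nat.findGreatest_eq_zero_iff]
  intro n hn hnp hsuf
  have htk : p.take n = [] := List.suffix_nil.mp hsuf
  have hlen := congrArg List.length htk
  rw [List.length_take, List.length_nil] at hlen
  have := Nat.min_eq_zero_iff.mp hlen
  omega

theorem pv_scan_correct (p : List String) (pi : List Nat)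
    (hpi : ∀ j, 1 ≤ j → j ≤ p.length → pi.getD (j - 1) 0 = pvBest p (p.take j) (j - 1)) :
    ∀ rest done, done.length + rest.length = p.length →
    rest.foldl (pvStep p pi) (pvBest p done p.length) = pvBest p (done ++ rest) p.length := by
  intro rest
  induction rest with
  | nil => intro done _; simp
  | cons c rest' ih =>
    intro done hlen
    simp only [List.foldl_cons]
    have hsd : pvBest p done p.length ≤ done.length := pv_best_le_length le_rfl
    have hstep := pv_step_correct (p := p) (pi := pi) (c := c) (t := done)
      (b := p.length) (b' := p.length) (s := pvBest p done p.length) rfl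
      (by simp at hlen ⊢; omega) (by simp at hlen ⊢; omega) (by omega) le_rfl
      (fun j h1 h2 => hpi j h1 (by have := pv_best_le (p := p) (t := done) p.length; omega))
    rw [hstep, ih (done ++ [c]) (by simp at hlen ⊢; omega)]
    congr 1
    simp

theorem pv_aloop_eq (rc pc : List String) :
    ∀ n : Nat, n ≤ rc.length → n ≤ pc.length →
    pvALoop rc pc (PySem.List.pyRange (n : Int) 0 (-1))
      = ((Nat.findGreatest (fun k => pc.take k <:+ rc) n : Nat) : Int) := by
  intro n
  induction n with
  | zero =>
    intro _ _
    rw [PySem.List.pyRange_neg_one_eq_nil (by norm_num)]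
    rfl
  | succ n ih =>
    intro hr hp
    rw [PySem.List.pyRange_neg_one_cons (by positivity)]
    show (if PySem.List.slice rc (some (-((n + 1 : Nat) : Int))) none
         = PySem.List.slice pc none (some ((n + 1 : Nat) : Int)) then ((n + 1 : Nat) : Int)
        else pvALoop rc pc (PySem.List.pyRange (((n + 1 : Nat) : Int) - 1) 0 (-1))) = _
    rw [PySem.List.slice_from_neg_natCast rc (n + 1) (by omega),
        PySem.List.slice_to_natCast]
    have harg : ((n + 1 : Nat) : Int) - 1 = (n : Int) := by push_cast; ring
    rw [harg, ih (by omega) (by omega)]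
    have hcond : (rc.drop (rc.length - (n + 1)) = pc.take (n + 1)) ↔ pc.take (n + 1) <:+ rc := by
      rw [List.suffix_iff_eq_drop]
      have hl : (pc.take (n + 1)).length = n + 1 := by
        rw [List.length_take]; omega
      rw [hl]
      exact eq_comm
    rw [Nat.findGreatest_succ]
    by_cases hs : pc.take (n + 1) <:+ rc
    · rw [if_pos (hcond.mpr hs), if_pos hs]
    · rw [if_neg (fun h => hs (hcond.mp h)), if_neg hs]

theorem pv_main (rc pc : List String) :
    trusted_retrieval_procedure_prefix_match_py rc pc
      = trusted_retrieval_procedure_prefix_match_py_alt rc pc := by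
  unfold trusted_retrieval_procedure_prefix_match_py trusted_retrieval_procedure_prefix_match_py_alt
  by_cases h2 : (pc.length : Int) < 2
  · rw [if_pos h2, if_pos h2]
  · rw [if_neg h2, if_neg h2]
    have hl2 : 2 ≤ pc.length := by exact_mod_cast not_lt.mp h2
    set M := min rc.length (pc.length - 1) with hM
    have hMr : M ≤ rc.length := Nat.min_le_left _ _
    have hMp : M ≤ pc.length := le_trans (Nat.min_le_right _ _) (by omega)
    have hmax : min (rc.length : Int) ((pc.length : Int) - 1) = (M : Int) := by
      rw [hM]
      push_cast [Nat.cast_min]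
      congr 1
      omega
    show pvALoop rc pc (PySem.List.pyRange (min (rc.length : Int) ((pc.length : Int) - 1)) 0 (-1)) = _
    rw [hmax, pv_aloop_eq rc pc M hMr hMp]
    by_cases hM0 : M = 0
    · rw [if_pos hM0, hM0]
      rfl
    · rw [if_neg hM0]
      have hM1 : 1 ≤ M := by omega
      set p := pc.take M with hp
      have hplen : p.length = M := by rw [hp, List.length_take]; omega
      rw [PySem.List.slice_from_neg_natCast rc M (by omega)]
      set w := rc.drop (rc.length - M) with hw
      have hwlen : w.length = M := by rw [hw, List.length_drop]; omega
      have hscan := pv_scan_correct p (pvPi p) (pv_pi_spec p (by omega)) w []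
        (by simp [hwlen, hplen])
      rw [pv_best_nil (by omega)] at hscan
      simp only [List.nil_append] at hscan
      show ((Nat.findGreatest (fun k => pc.take k <:+ rc) M : Nat) : Int)
        = ((w.foldl (pvStep p (pvPi p)) 0 : Nat) : Int)
      rw [hscan]
      congr 1
      unfold pvBest
      rw [hplen]
      apply pv_findGreatest_congr
      intro k hk
      have htk : p.take k = pc.take k := by
        rw [hp, List.take_take, min_eq_left hk]
      rw [htk]
      constructor
      · intro hsuf
        apply pv_suffix_of_suffix_length_le hsuf (hw ▸ List.drop_suffix _ _)
        rw [List.length_take, hwlen]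
        omega
      · intro hsuf
        exact hsuf.trans (hw ▸ List.drop_suffix _ _)

-- ===== VERDICT (by name: the statement is the Claim_ definition above) =====
theorem trusted_retrieval_procedure_prefix_match_py_spec : Claim_equal_trusted_retrieval_procedure_prefix_match_py := by
  intro rc pc _
  unfold Spec_trusted_retrieval_procedure_prefix_match_py
  exact pv_main rc pc
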